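-- pv_equiv track=rewrite | github.com/jun9898/krafton-jungle-study | algorithm/2305/230526/programmers_달리기경주.py | solution
-- ===== SOURCE A (Python) =====
-- def solution(players, callings):
--     playerDic = {player:i+1 for i,player in enumerate(players)}
--     indexPlayer = {i+1:player for i,player in enumerate(players)}
--     for i in callings:
--         a = playerDic[i]
--         b = indexPlayer[a-1]
--
--         playerDic[b] = a
--         playerDic[i] = a-1
--
--         indexPlayer[a] = b
--         indexPlayer[a-1] = i
--
--     return list(indexPlayer.values())
-- ===== SOURCE B (Python) =====
-- def solution(players, callings):
--     rank = {p: i for i, p in enumerate(players)}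
--     for c in callings:
--         r = rank[c]
--         for p in players:
--             if rank[p] == r - 1:
--                 rank[p] = r
--                 break
--         rank[c] = r - 1
--     result = list(players)
--     for p, r in rank.items():
--         result[r] = p
--     return result
-- ===== Notes on version B (the rewrite author's own statement) =====
-- stated objective: alternative
-- what changed: B drops A's two synchronized inverse dictionaries: it keeps a single forward rank map (player -> current position), finds the overtaken runner by a plain linear scan over players at each calling, and rebuilds the result by one final placement pass (result[rank[p]] = p) over a copy of players instead of reading back an index->player dict with .values(); …
-- outside the precondition, e.g. on solution(['b', 'a', 'b'], ['a']): A returns ['a', 'b', 'b'], B returns ['a', 'a', 'b']; on solution(['a', 'b', 'a'], ['a']): A returns ['a', 'a', 'b'], B returns ['a', 'a', 'b']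
import Mathlib
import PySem

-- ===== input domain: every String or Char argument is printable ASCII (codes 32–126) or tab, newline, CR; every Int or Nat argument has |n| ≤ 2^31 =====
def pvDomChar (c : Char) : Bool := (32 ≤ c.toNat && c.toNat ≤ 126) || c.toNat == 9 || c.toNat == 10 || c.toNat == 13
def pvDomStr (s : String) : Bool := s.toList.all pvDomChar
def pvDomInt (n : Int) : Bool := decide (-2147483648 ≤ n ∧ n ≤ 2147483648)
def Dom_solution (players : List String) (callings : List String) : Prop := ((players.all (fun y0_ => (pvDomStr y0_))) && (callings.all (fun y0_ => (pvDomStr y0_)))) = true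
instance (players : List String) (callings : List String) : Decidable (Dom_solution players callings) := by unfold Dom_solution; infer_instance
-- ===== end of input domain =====

-- B keeps a single forward rank map (player -> current position), finds the overtaken
-- runner by a linear scan per calling, and rebuilds the order by one final placement pass
-- (result[r] = p) — instead of A's two synchronized inverse dictionaries read via .values().


-- ===== PORT A =====
-- one loop iteration of A: a = playerDic[i]; b = indexPlayer[a-1]; four dict writes.
-- where Python raises KeyError (get? = none) the port keeps the state; those inputs are outside Pre_.
def solAStep (st : PySem.Dict String Int × PySem.Dict Int String) (c : String) :
    PySem.Dict String Int × PySem.Dict Int String :=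
  match st.1.get? c with
  | none => st
  | some a =>
    match st.2.get? (a - 1) with
    | none => st
    | some b => ((st.1.insert b a).insert c (a - 1), (st.2.insert a b).insert (a - 1) c)

def solution (players : List String) (callings : List String) : List String :=
  let playerDic : PySem.Dict String Int :=
    (PySem.List.enumerate players 0).foldl (fun d ip => d.insert ip.2 (ip.1 + 1)) PySem.Dict.empty
  let indexPlayer : PySem.Dict Int String :=
    (PySem.List.enumerate players 0).foldl (fun d ip => d.insert (ip.1 + 1) ip.2) PySem.Dict.empty
  (callings.foldl solAStep (playerDic, indexPlayer)).2.values

-- ===== PORT B =====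
-- inner 'for p in players: if rank[p] == r-1: rank[p] = r; break' — first match, or no effect.
-- rank[p] cannot raise (every p in players is a key of rank throughout), so getD is exact.
def findPred (rank : PySem.Dict String Int) (target : Int) : List String → Option String
  | [] => none
  | p :: ps => if rank.getD p 0 == target then some p else findPred rank target ps

-- one loop iteration of B: r = rank[c]; inner scan (break); rank[c] = r - 1.
-- where Python raises KeyError on rank[c] (get? = none) the port keeps rank; outside Pre_.
def solBStep (players : List String) (rank : PySem.Dict String Int) (c : String) :
    PySem.Dict String Int :=
  match rank.get? c with
  | none => rank
  | some r =>
    let rank1 := match findPred rank (r - 1) players with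
      | none => rank
      | some b => rank.insert b r
    rank1.insert c (r - 1)

def solution_alt (players : List String) (callings : List String) : List String :=
  let rank : PySem.Dict String Int :=
    (PySem.List.enumerate players 0).foldl (fun d ip => d.insert ip.2 ip.1) PySem.Dict.empty
  let final := callings.foldl (solBStep players) rank
  -- result = list(players); for p, r in rank.items(): result[r] = p  (pySetD: Python indexing)
  final.items.foldl (fun res pr => PySem.List.pySetD res pr.2 pr.1) players

-- ===== PRECONDITION & SPEC =====
-- reference simulation used ONLY to state A's dynamic domain (it is neither port's code):
-- the race as a plain list, one adjacent swap per calling.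
def runStep (arr : List String) (c : String) : List String :=
  match PySem.List.index? arr c with
  | none => arr
  | some k => (arr.set (k - 1) (arr.getD k "")).set k (arr.getD (k - 1) "")

def validRun : List String → List String → Bool
  | _, [] => true
  | arr, c :: cs =>
    match PySem.List.index? arr c with
    | none => false
    | some k => decide (1 ≤ k) && validRun (runStep arr c) cs

-- Pre_ admits any players when callings is empty (both return the players unchanged), and
-- otherwise excludes (a) duplicate player names — A's name-keyed dicts alias the duplicates
-- and the comprehension keeps only the last index, an accidental value — and (b) exactly the
-- inputs where A raises KeyError: a calling naming an absent player or the then-current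
-- leader.  That crash region depends on the evolving order, so it has no static
-- characterization; validRun states it by an independent reference simulation, not by either
-- port's code.
def Pre_solution (players : List String) (callings : List String) : Prop :=
  callings = [] ∨ (players.Nodup ∧ validRun players callings = true)
instance (players : List String) (callings : List String) : Decidable (Pre_solution players callings) := by unfold Pre_solution; infer_instance

def pvWitness_solution : List String × List String := (["a", "b", "c"], ["b", "c", "c"])

def Spec_solution (players : List String) (callings : List String) (out : List String) : Prop := out = solution_alt players callings
instance (players : List String) (callings : List String) (out : List String) : Decidable (Spec_solution players callings out) := by unfold Spec_solution; infer_instance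

-- ===== CLAIM (what is proved, stated in full; the proofs are below) =====
def Claim_equal_solution : Prop := ∀ (players : List String) (callings : List String), Dom_solution players callings → Pre_solution players callings → Spec_solution players callings (solution players callings)

-- ===== LEMMAS AND PROOFS =====

lemma getD_eq_getElem' (arr : List String) (j : Nat) (hj : j < arr.length) :
    arr.getD j "" = arr[j] := by
  simp [List.getD_eq_getElem?_getD, List.getElem?_eq_getElem hj]

lemma range_map_getD (arr : List String) :
    (List.range arr.length).map (fun j : Nat => arr.getD j "") = arr := by
  apply List.ext_getElem
  · simp
  · intro i h1 h2
    simp [List.getD_eq_getElem?_getD, List.getElem?_eq_getElem h2]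

lemma index?_of_nodup (arr : List String) (hnd : arr.Nodup) (j : Nat) (hj : j < arr.length) :
    PySem.List.index? arr arr[j] = some j := by
  have hmem : arr[j] ∈ arr := List.getElem_mem hj
  obtain ⟨k, hk⟩ : ∃ k, PySem.List.index? arr arr[j] = some k :=
    Option.isSome_iff_exists.mp ((PySem.List.index?_isSome_iff arr arr[j]).mpr hmem)
  obtain ⟨hklt, hak, _⟩ := PySem.List.getElem_of_index?_eq_some hk
  have : k = j := by
    have := hnd.getElem_inj_iff.mp hak
    omega
  rw [hk, this]

-- facts about one reference swap, under validity (c at index k, 1 ≤ k, no duplicates)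
lemma runStep_eq (arr : List String) (c : String) (k : Nat)
    (hk : PySem.List.index? arr c = some k) :
    runStep arr c = (arr.set (k - 1) (arr.getD k "")).set k (arr.getD (k - 1) "") := by
  simp only [runStep, hk]

lemma runStep_getD (arr : List String) (c : String) (k : Nat)
    (hk : PySem.List.index? arr c = some k) (h1 : 1 ≤ k)
    (j : Nat) (hj : j < arr.length) :
    (runStep arr c).getD j "" =
      if j = k then arr.getD (k - 1) "" else if j = k - 1 then c else arr.getD j "" := by
  obtain ⟨hklt, hak, _⟩ := PySem.List.getElem_of_index?_eq_some hk
  have hj' : j < (runStep arr c).length := by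
    rw [runStep_eq arr c k hk]; simpa using hj
  rw [getD_eq_getElem' _ j hj']
  simp only [runStep_eq arr c k hk] at hj' ⊢
  simp only [List.getElem_set]
  have hk1 : k - 1 < arr.length := by omega
  split_ifs with h1' h2 h3 h4 h5 <;> first
    | rfl
    | omega
    | (rw [← hak, getD_eq_getElem' arr k hklt])
    | (rw [getD_eq_getElem' arr j hj])

lemma runStep_length (arr : List String) (c : String) (k : Nat)
    (hk : PySem.List.index? arr c = some k) :
    (runStep arr c).length = arr.length := by
  rw [runStep_eq arr c k hk]; simp

lemma runStep_nodup (arr : List String) (c : String) (k : Nat) (hnd : arr.Nodup)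
    (hk : PySem.List.index? arr c = some k) (h1 : 1 ≤ k) :
    (runStep arr c).Nodup := by
  obtain ⟨hklt, hak, _⟩ := PySem.List.getElem_of_index?_eq_some hk
  have hk1 : k - 1 < arr.length := by omega
  have hbc : arr[k-1] ≠ c := by
    rw [← hak]
    intro h
    have := hnd.getElem_inj_iff.mp h
    omega
  have hlen := runStep_length arr c k hk
  rw [List.nodup_iff_injective_getElem]
  rintro ⟨u, hu⟩ ⟨v, hv⟩ huv
  have hu' : u < arr.length := by omega
  have hv' : v < arr.length := by omega
  simp only at huv
  rw [← getD_eq_getElem' _ u hu, ← getD_eq_getElem' _ v hv,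
      runStep_getD arr c k hk h1 u hu', runStep_getD arr c k hk h1 v hv'] at huv
  apply Fin.ext
  simp only
  have hgd_k : arr.getD k "" = c := by rw [getD_eq_getElem' arr k hklt, hak]
  split_ifs at huv with h1' h2 h3 h4 h5 h6 h7 h8 <;>
    first
      | omega
      | (rw [getD_eq_getElem' arr (k-1) hk1] at huv; exact absurd huv hbc)
      | (rw [getD_eq_getElem' arr (k-1) hk1] at huv; exact absurd huv.symm hbc)
      | (rw [getD_eq_getElem' arr (k-1) hk1, getD_eq_getElem' arr v hv'] at huv;
         have := hnd.getElem_inj_iff.mp huv; omega)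
      | (rw [getD_eq_getElem' arr (k-1) hk1, getD_eq_getElem' arr u hu'] at huv;
         have := hnd.getElem_inj_iff.mp huv.symm; omega)
      | (rw [← hgd_k, getD_eq_getElem' arr k hklt, getD_eq_getElem' arr v hv'] at huv;
         have := hnd.getElem_inj_iff.mp huv; omega)
      | (rw [← hgd_k, getD_eq_getElem' arr k hklt, getD_eq_getElem' arr u hu'] at huv;
         have := hnd.getElem_inj_iff.mp huv.symm; omega)
      | (rw [getD_eq_getElem' arr u hu', getD_eq_getElem' arr v hv'] at huv;
         have := hnd.getElem_inj_iff.mp huv; omega)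

lemma runStep_mem (arr : List String) (c : String) (k : Nat) (_hnd : arr.Nodup)
    (hk : PySem.List.index? arr c = some k) (h1 : 1 ≤ k) (x : String) :
    x ∈ runStep arr c ↔ x ∈ arr := by
  obtain ⟨hklt, hak, _⟩ := PySem.List.getElem_of_index?_eq_some hk
  have hk1 : k - 1 < arr.length := by omega
  have hlen := runStep_length arr c k hk
  constructor
  · intro hx
    obtain ⟨j, hj, e⟩ := List.mem_iff_getElem.mp hx
    have hj' : j < arr.length := by omega
    rw [← getD_eq_getElem' _ j hj, runStep_getD arr c k hk h1 j hj'] at e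
    split_ifs at e
    · rw [← e, getD_eq_getElem' arr (k-1) hk1]; exact List.getElem_mem hk1
    · rw [← e, ← hak]; exact List.getElem_mem hklt
    · rw [← e, getD_eq_getElem' arr j hj']; exact List.getElem_mem hj'
  · intro hx
    obtain ⟨j, hj, e⟩ := List.mem_iff_getElem.mp hx
    rw [List.mem_iff_getElem]
    by_cases hjk : j = k
    · refine ⟨k - 1, by omega, ?_⟩
      rw [← getD_eq_getElem' _ (k-1) (by omega), runStep_getD arr c k hk h1 (k-1) hk1,
          if_neg (by omega), if_pos rfl]
      subst hjk; rw [hak] at e; exact e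
    · by_cases hjk1 : j = k - 1
      · refine ⟨k, by omega, ?_⟩
        rw [← getD_eq_getElem' _ k (by omega), runStep_getD arr c k hk h1 k hklt,
            if_pos rfl, getD_eq_getElem' arr (k-1) hk1]
        subst hjk1; exact e
      · refine ⟨j, by omega, ?_⟩
        rw [← getD_eq_getElem' _ j (by omega), runStep_getD arr c k hk h1 j hj,
            if_neg hjk, if_neg hjk1, getD_eq_getElem' arr j hj]
        exact e

-- ---------- A side ----------

-- the running invariant tying A's two dicts to the reference list `arr`:
-- arr has no duplicates, playerDic maps the player at index j to position j+1,
-- and indexPlayer's items are exactly (1, arr[0]), …, (n, arr[n-1]) in order.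
def SimInv (arr : List String) (pd : PySem.Dict String Int) (ip : PySem.Dict Int String) : Prop :=
  arr.Nodup ∧
  (∀ (j : Nat) (_ : j < arr.length), pd.get? (arr.getD j "") = some ((j : Int) + 1)) ∧
  ip.items = (List.range arr.length).map (fun j : Nat => ((j : Int) + 1, arr.getD j ""))

lemma ip_keys (n : Nat) (g : Nat → String) (ip : PySem.Dict Int String)
    (hip : ip.items = (List.range n).map (fun j : Nat => ((j : Int) + 1, g j))) :
    ip.keys = (List.range n).map (fun j : Nat => ((j : Int) + 1)) := by
  simp only [PySem.Dict.keys, hip, List.map_map]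
  rfl

lemma ip_keys_nodup (n : Nat) (g : Nat → String) (ip : PySem.Dict Int String)
    (hip : ip.items = (List.range n).map (fun j : Nat => ((j : Int) + 1, g j))) :
    ip.keys.Nodup := by
  rw [ip_keys n g ip hip]
  refine List.Nodup.map ?_ List.nodup_range
  intro a b hab
  simp only at hab
  omega

lemma ip_get (n : Nat) (g : Nat → String) (ip : PySem.Dict Int String)
    (hip : ip.items = (List.range n).map (fun j : Nat => ((j : Int) + 1, g j)))
    (k : Nat) (hk : k < n) :
    ip.get? ((k : Int) + 1) = some (g k) := by
  apply PySem.Dict.get?_of_mem_items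
  · rw [hip]
    exact List.mem_map.mpr ⟨k, List.mem_range.mpr hk, rfl⟩
  · exact ip_keys_nodup n g ip hip

-- the A-side loop argument: A's fold over the two dicts tracks the reference run
lemma loopA (cs : List String) : ∀ (arr : List String) (pd : PySem.Dict String Int) (ip : PySem.Dict Int String),
    SimInv arr pd ip →
    validRun arr cs = true →
    (cs.foldl solAStep (pd, ip)).2.values = cs.foldl runStep arr := by
  induction cs with
  | nil =>
    intro arr pd ip ⟨hnd, hpd, hip⟩ _
    simp only [List.foldl_nil, PySem.Dict.values, hip, List.map_map]
    exact range_map_getD arr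
  | cons c cs ih =>
    intro arr pd ip ⟨hnd, hpd, hip⟩ hvr
    obtain ⟨k, hk, h1k, hvr'⟩ : ∃ k, PySem.List.index? arr c = some k ∧ 1 ≤ k ∧
        validRun (runStep arr c) cs = true := by
      unfold validRun at hvr
      rcases hidx : PySem.List.index? arr c with _ | k
      · rw [hidx] at hvr; simp at hvr
      · rw [hidx] at hvr
        simp only [Bool.and_eq_true, decide_eq_true_eq] at hvr
        exact ⟨k, rfl, hvr.1, hvr.2⟩
    obtain ⟨hklt, hak, _⟩ := PySem.List.getElem_of_index?_eq_some hk
    set n := arr.length with hn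
    have hk1 : k - 1 < n := by omega
    have hbc : arr[k-1] ≠ c := by
      rw [← hak]
      intro h
      have := (hnd.getElem_inj_iff).mp h
      omega
    -- A's step
    have hpdc : pd.get? c = some ((k : Int) + 1) := by
      have := hpd k hklt
      rwa [getD_eq_getElem' arr k hklt, hak] at this
    have hcast : ((k : Int) + 1 - 1) = (((k - 1 : Nat) : Int) + 1) := by omega
    have hipk : ip.get? ((k : Int) + 1 - 1) = some (arr.getD (k-1) "") := by
      rw [hcast]
      exact ip_get n (fun j => arr.getD j "") ip hip (k-1) hk1
    have hstepA : solAStep (pd, ip) c =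
        ((pd.insert (arr.getD (k-1) "") ((k : Int) + 1)).insert c ((k : Int) + 1 - 1),
         (ip.insert ((k : Int) + 1) (arr.getD (k-1) "")).insert ((k : Int) + 1 - 1) c) := by
      simp only [solAStep, hpdc, hipk]
    set arr' : List String := runStep arr c with harr'
    have hlen' : arr'.length = n := runStep_length arr c k hk
    have hgd_k : arr.getD k "" = c := by rw [getD_eq_getElem' arr k hklt, hak]
    have hget : ∀ (j : Nat) (_ : j < n),
        arr'.getD j "" = if j = k then arr.getD (k-1) "" else if j = k - 1 then c else arr.getD j "" :=
      fun j hj => runStep_getD arr c k hk h1k j hj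
    have hnd' : arr'.Nodup := runStep_nodup arr c k hnd hk h1k
    have hb_ne_c : arr.getD (k-1) "" ≠ c := by
      rw [getD_eq_getElem' arr (k-1) hk1]; exact hbc
    have hpd' : ∀ (j : Nat) (_ : j < arr'.length),
        ((pd.insert (arr.getD (k-1) "") ((k : Int) + 1)).insert c ((k : Int) + 1 - 1)).get? (arr'.getD j "")
          = some ((j : Int) + 1) := by
      intro j hj
      have hj' : j < n := by omega
      rw [hget j hj']
      split_ifs with h1 h2
      · rw [PySem.Dict.get?_insert, if_neg hb_ne_c, PySem.Dict.get?_insert, if_pos rfl]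
        subst h1; rfl
      · rw [PySem.Dict.get?_insert, if_pos rfl]
        have : ((k : Int) + 1 - 1) = ((j : Int) + 1) := by omega
        rw [this]
      · have hjc : arr.getD j "" ≠ c := by
          rw [getD_eq_getElem' arr j hj', ← hak]
          intro h; have := (hnd.getElem_inj_iff).mp h; omega
        have hjb : arr.getD j "" ≠ arr.getD (k-1) "" := by
          rw [getD_eq_getElem' arr j hj', getD_eq_getElem' arr (k-1) hk1]
          intro h; have := (hnd.getElem_inj_iff).mp h; omega
        rw [PySem.Dict.get?_insert, if_neg hjc, PySem.Dict.get?_insert, if_neg hjb]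
        exact hpd j hj'
    have hipcont1 : ip.contains ((k : Int) + 1) = true := by
      rw [PySem.Dict.contains_iff_mem_keys, ip_keys n (fun j => arr.getD j "") ip hip]
      exact List.mem_map.mpr ⟨k, List.mem_range.mpr hklt, rfl⟩
    have hitems1 : (ip.insert ((k : Int) + 1) (arr.getD (k-1) "")).items =
        (List.range n).map (fun j : Nat =>
          if (((j : Int) + 1) == ((k : Int) + 1)) = true
          then (((k : Int) + 1), arr.getD (k-1) "")
          else (((j : Int) + 1), arr.getD j "")) := by
      rw [PySem.Dict.items_insert_of_contains _ _ hipcont1, hip, List.map_map]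
      rfl
    have hipcont2 : (ip.insert ((k : Int) + 1) (arr.getD (k-1) "")).contains ((k : Int) + 1 - 1) = true := by
      rw [PySem.Dict.contains_iff_mem_keys]
      simp only [PySem.Dict.keys, hitems1, List.map_map]
      refine List.mem_map.mpr ⟨k - 1, List.mem_range.mpr hk1, ?_⟩
      have e : ((((k : Nat) - 1 : Nat) : Int) + 1 == ((k : Int) + 1)) = false := by
        simp only [beq_eq_false_iff_ne, ne_eq]
        omega
      simp only [Function.comp_apply, e, Bool.false_eq_true, if_false]
      show ((k - 1 : Nat) : Int) + 1 = (k : Int) + 1 - 1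
      omega
    have hip' : ((ip.insert ((k : Int) + 1) (arr.getD (k-1) "")).insert ((k : Int) + 1 - 1) c).items =
        (List.range arr'.length).map (fun j : Nat => ((j : Int) + 1, arr'.getD j "")) := by
      rw [PySem.Dict.items_insert_of_contains _ _ hipcont2, hitems1, List.map_map, hlen']
      apply List.map_congr_left
      intro j hjr
      have hj : j < n := List.mem_range.mp hjr
      simp only [Function.comp_apply]
      rw [hget j hj]
      by_cases h1 : j = k
      · subst h1
        have e1 : (((j : Int) + 1) == ((j : Int) + 1)) = true := by simp
        simp only [e1]
        simp
      · have e1 : (((j : Int) + 1) == ((k : Int) + 1)) = false := by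
          simp only [beq_eq_false_iff_ne, ne_eq]; omega
        simp only [e1]
        simp only [Bool.false_eq_true, if_false, if_neg (by omega : ¬ j = k)]
        by_cases h2 : j = k - 1
        · have e3 : ((k : Int) + 1 - 1) = ((j : Int) + 1) := by omega
          simp [e3, h2]
        · have e2 : (((j : Int) + 1) == ((k : Int) + 1 - 1)) = false := by
            simp only [beq_eq_false_iff_ne, ne_eq]; omega
          simp only [e2, Bool.false_eq_true, if_false, if_neg h2]
    simp only [List.foldl_cons, hstepA]
    exact ih arr' _ _ ⟨hnd', hpd', hip'⟩ hvr'

-- ---------- B side ----------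

lemma findPred_eq_some (rank : PySem.Dict String Int) (target : Int) (b : String) :
    ∀ l : List String, b ∈ l → (∀ p ∈ l, rank.getD p 0 = target ↔ p = b) →
    findPred rank target l = some b := by
  intro l
  induction l with
  | nil => intro h; simp at h
  | cons p ps ih =>
    intro hb hchar
    unfold findPred
    by_cases hp : rank.getD p 0 = target
    · have hpb : p = b := (hchar p List.mem_cons_self).mp hp
      subst hpb
      simp only [beq_iff_eq, if_pos hp]
    · have hpb : p ≠ b := fun h => hp (((hchar p List.mem_cons_self)).mpr h)
      have hb' : b ∈ ps := by
        rcases hb with _ | hb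
        · exact absurd rfl hpb
        · assumption
      simp only [beq_iff_eq, if_neg hp]
      exact ih hb' (fun q hq => hchar q (List.mem_cons_of_mem _ hq))

-- the B-side loop argument: the rank dict always maps each player to its index in the
-- reference run's current order
lemma loopB (players : List String) (cs : List String) :
    ∀ (arr : List String) (rank : PySem.Dict String Int),
    arr.Nodup → (∀ x, x ∈ arr ↔ x ∈ players) →
    (∀ p, rank.get? p = (PySem.List.index? arr p).map (fun k : Nat => (k : Int))) →
    rank.keys = players →
    validRun arr cs = true →
    (cs.foldl runStep arr).Nodup ∧
    (∀ x, x ∈ cs.foldl runStep arr ↔ x ∈ players) ∧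
    (∀ p, (cs.foldl (solBStep players) rank).get? p =
      (PySem.List.index? (cs.foldl runStep arr) p).map (fun k : Nat => (k : Int))) ∧
    (cs.foldl (solBStep players) rank).keys = players := by
  induction cs with
  | nil =>
    intro arr rank hnd hmem hrank hkeys _
    exact ⟨hnd, hmem, hrank, hkeys⟩
  | cons c cs ih =>
    intro arr rank hnd hmem hrank hkeys hvr
    obtain ⟨k, hk, h1k, hvr'⟩ : ∃ k, PySem.List.index? arr c = some k ∧ 1 ≤ k ∧
        validRun (runStep arr c) cs = true := by
      unfold validRun at hvr
      rcases hidx : PySem.List.index? arr c with _ | k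
      · rw [hidx] at hvr; simp at hvr
      · rw [hidx] at hvr
        simp only [Bool.and_eq_true, decide_eq_true_eq] at hvr
        exact ⟨k, rfl, hvr.1, hvr.2⟩
    obtain ⟨hklt, hak, _⟩ := PySem.List.getElem_of_index?_eq_some hk
    have hk1 : k - 1 < arr.length := by omega
    have hbc : arr[k-1] ≠ c := by
      rw [← hak]
      intro h
      have := hnd.getElem_inj_iff.mp h
      omega
    -- evaluate B's step
    have hrc : rank.get? c = some ((k : Nat) : Int) := by rw [hrank, hk]; rfl
    have hidxb : PySem.List.index? arr arr[k-1] = some (k - 1) := index?_of_nodup arr hnd (k-1) hk1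
    have hfind : findPred rank ((k : Int) - 1) players = some arr[k-1] := by
      apply findPred_eq_some
      · exact (hmem arr[k-1]).mp (List.getElem_mem hk1)
      · intro p hp
        have hpmem : p ∈ arr := (hmem p).mpr hp
        obtain ⟨j, hj, e⟩ := List.mem_iff_getElem.mp hpmem
        subst e
        rw [PySem.Dict.getD_eq_get?_getD, hrank, index?_of_nodup arr hnd j hj]
        constructor
        · intro h
          have : j = k - 1 := by
            simp only [Option.map_some, Option.getD_some] at h
            omega
          subst this; rfl
        · intro h
          have : j = k - 1 := by
            have := hnd.getElem_inj_iff.mp h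
            omega
          subst this
          simp only [Option.map_some, Option.getD_some]
          omega
    have hstepB : solBStep players rank c =
        (rank.insert arr[k-1] ((k : Nat) : Int)).insert c ((k : Int) - 1) := by
      simp only [solBStep, hrc, hfind]
    set arr' : List String := runStep arr c with harr'
    have hnd' : arr'.Nodup := runStep_nodup arr c k hnd hk h1k
    have hmem' : ∀ x, x ∈ arr' ↔ x ∈ players :=
      fun x => (runStep_mem arr c k hnd hk h1k x).trans (hmem x)
    have hlen' : arr'.length = arr.length := runStep_length arr c k hk
    have hget : ∀ (j : Nat) (_ : j < arr.length),
        arr'.getD j "" = if j = k then arr.getD (k-1) "" else if j = k - 1 then c else arr.getD j "" :=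
      fun j hj => runStep_getD arr c k hk h1k j hj
    have harr'_k1 : arr'[k-1]'(by omega) = c := by
      rw [← getD_eq_getElem' arr' (k-1) (by omega), hget (k-1) hk1, if_neg (by omega), if_pos rfl]
    have harr'_k : arr'[k]'(by omega) = arr[k-1] := by
      rw [← getD_eq_getElem' arr' k (by omega), hget k hklt, if_pos rfl,
          getD_eq_getElem' arr (k-1) hk1]
    have hrank' : ∀ p, ((rank.insert arr[k-1] ((k : Nat) : Int)).insert c ((k : Int) - 1)).get? p =
        (PySem.List.index? arr' p).map (fun k : Nat => (k : Int)) := by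
      intro p
      by_cases hpc : p = c
      · subst hpc
        rw [PySem.Dict.get?_insert, if_pos rfl]
        have : PySem.List.index? arr' p = some (k - 1) := by
          have := index?_of_nodup arr' hnd' (k-1) (by omega)
          rwa [harr'_k1] at this
        rw [this]
        simp only [Option.map_some]
        congr 1
        omega
      · rw [PySem.Dict.get?_insert, if_neg hpc]
        by_cases hpb : p = arr[k-1]
        · subst hpb
          rw [PySem.Dict.get?_insert, if_pos rfl]
          have : PySem.List.index? arr' arr[k-1] = some k := by
            have := index?_of_nodup arr' hnd' k (by omega)
            rwa [harr'_k] at this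
          rw [this]
          rfl
        · rw [PySem.Dict.get?_insert, if_neg hpb, hrank]
          by_cases hpmem : p ∈ arr
          · obtain ⟨j, hj, e⟩ := List.mem_iff_getElem.mp hpmem
            have hjk : j ≠ k := by
              intro h; subst h; exact hpc (e.symm.trans hak)
            have hjk1 : j ≠ k - 1 := by
              intro h; subst h; exact hpb e.symm
            have harr'_j : arr'[j]'(by omega) = p := by
              rw [← getD_eq_getElem' arr' j (by omega), hget j hj, if_neg hjk, if_neg hjk1,
                  getD_eq_getElem' arr j hj]
              exact e
            have h1 : PySem.List.index? arr p = some j := by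
              have := index?_of_nodup arr hnd j hj; rwa [e] at this
            have h2 : PySem.List.index? arr' p = some j := by
              have := index?_of_nodup arr' hnd' j (by omega); rwa [harr'_j] at this
            rw [h1, h2]
          · have hpmem' : p ∉ arr' := fun h => hpmem ((runStep_mem arr c k hnd hk h1k p).mp h)
            rw [(PySem.List.index?_eq_none_iff arr p).mpr hpmem,
                (PySem.List.index?_eq_none_iff arr' p).mpr hpmem']
    have hcontb : rank.contains arr[k-1] = true := by
      rw [PySem.Dict.contains_iff_mem_keys, hkeys]
      exact (hmem arr[k-1]).mp (List.getElem_mem hk1)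
    have hkeys1 : (rank.insert arr[k-1] ((k : Nat) : Int)).keys = players := by
      rw [PySem.Dict.keys_insert_of_contains _ _ hcontb]; exact hkeys
    have hcontc : (rank.insert arr[k-1] ((k : Nat) : Int)).contains c = true := by
      rw [PySem.Dict.contains_iff_mem_keys, hkeys1]
      exact (hmem c).mp (by rw [← hak]; exact List.getElem_mem hklt)
    have hkeys' : ((rank.insert arr[k-1] ((k : Nat) : Int)).insert c ((k : Int) - 1)).keys = players := by
      rw [PySem.Dict.keys_insert_of_contains _ _ hcontc]; exact hkeys1
    simp only [List.foldl_cons, hstepB]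
    exact ih arr' _ hnd' hmem' hrank' hkeys' hvr'

-- ---------- initial dictionaries ----------

lemma enumerate_pd_items (players : List String) (hnd : players.Nodup) (f : Int → Int) :
    ((PySem.List.enumerate players 0).foldl (fun d ip => d.insert ip.2 (f ip.1))
      (PySem.Dict.empty : PySem.Dict String Int)).items =
    (PySem.List.enumerate players 0).map (fun a => (a.2, f a.1)) := by
  have h := PySem.Dict.items_foldl_insert_fresh (PySem.List.enumerate players 0)
    (fun a => a.2) (fun a => f a.1) PySem.Dict.empty
    (fun a _ => PySem.Dict.contains_empty a.2)
    (by rw [PySem.List.map_snd_enumerate]; exact hnd)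
  simpa using h

lemma enumerate_ip_items (players : List String) :
    ((PySem.List.enumerate players 0).foldl (fun d ip => d.insert (ip.1 + 1) ip.2)
      (PySem.Dict.empty : PySem.Dict Int String)).items =
    (List.range players.length).map (fun j : Nat => ((j : Int) + 1, players.getD j "")) := by
  have hmapeq : (PySem.List.enumerate players 0).map (fun a => (a.1 + 1, a.2)) =
      (List.range players.length).map (fun j : Nat => ((j : Int) + 1, players.getD j "")) := by
    apply List.ext_getElem
    · simp [PySem.List.length_enumerate]
    · intro i h1 h2
      simp only [List.getElem_map, PySem.List.getElem_enumerate, List.getElem_range]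
      have hi : i < players.length := by
        simpa [PySem.List.length_enumerate] using h1
      rw [getD_eq_getElem' players i hi]
      simp
  have hfresh := PySem.Dict.items_foldl_insert_fresh (PySem.List.enumerate players 0)
    (fun a => a.1 + 1) (fun a => a.2) PySem.Dict.empty
    (fun a _ => PySem.Dict.contains_empty (a.1 + 1))
    (by
      have : (PySem.List.enumerate players 0).map (fun a => a.1 + 1) =
          (List.range players.length).map (fun j : Nat => ((j : Int) + 1)) := by
        apply List.ext_getElem
        · simp [PySem.List.length_enumerate]
        · intro i h1 h2
          simp [PySem.List.getElem_enumerate]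
      rw [this]
      refine List.Nodup.map ?_ List.nodup_range
      intro a b hab
      simp only at hab
      omega)
  rw [hfresh, ← hmapeq]
  simp only [show (PySem.Dict.empty : PySem.Dict Int String).items = [] from rfl,
    List.nil_append]

lemma pd_keys_nodup (players : List String) (hnd : players.Nodup) (f : Int → Int) :
    ((PySem.List.enumerate players 0).foldl (fun d ip => d.insert ip.2 (f ip.1))
      (PySem.Dict.empty : PySem.Dict String Int)).keys.Nodup := by
  show (List.map Prod.fst _).Nodup
  rw [enumerate_pd_items players hnd f, List.map_map]
  have : (Prod.fst ∘ fun a : Int × String => (a.2, f a.1)) = fun a : Int × String => a.2 := rfl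
  rw [this, PySem.List.map_snd_enumerate]
  exact hnd

lemma pd_initial_get (players : List String) (hnd : players.Nodup) (f : Int → Int)
    (j : Nat) (hj : j < players.length) :
    ((PySem.List.enumerate players 0).foldl (fun d ip => d.insert ip.2 (f ip.1))
      (PySem.Dict.empty : PySem.Dict String Int)).get? (players[j]) = some (f j) := by
  apply PySem.Dict.get?_of_mem_items
  · rw [enumerate_pd_items players hnd f]
    refine List.mem_map.mpr ⟨((j : Int), players[j]), ?_, ?_⟩
    · rw [List.mem_iff_getElem]
      exact ⟨j, by simpa [PySem.List.length_enumerate] using hj,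
        by rw [PySem.List.getElem_enumerate]; simp⟩
    · rfl
  · exact pd_keys_nodup players hnd f

lemma pd_initial (players : List String) (hnd : players.Nodup) (j : Nat) (hj : j < players.length) :
    ((PySem.List.enumerate players 0).foldl (fun d ip => d.insert ip.2 (ip.1 + 1))
      (PySem.Dict.empty : PySem.Dict String Int)).get? (players.getD j "") = some ((j : Int) + 1) := by
  rw [getD_eq_getElem' players j hj]
  exact pd_initial_get players hnd (fun a => a + 1) j hj

lemma rank_initial (players : List String) (hnd : players.Nodup) (p : String) :
    ((PySem.List.enumerate players 0).foldl (fun d ip => d.insert ip.2 ip.1)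
      (PySem.Dict.empty : PySem.Dict String Int)).get? p =
    (PySem.List.index? players p).map (fun k : Nat => (k : Int)) := by
  by_cases hp : p ∈ players
  · obtain ⟨j, hj, e⟩ := List.mem_iff_getElem.mp hp
    subst e
    rw [index?_of_nodup players hnd j hj]
    have := pd_initial_get players hnd (fun a => a) j hj
    simpa using this
  · rw [(PySem.List.index?_eq_none_iff players p).mpr hp]
    simp only [Option.map_none]
    rw [PySem.Dict.get?_eq_none_iff_not_mem_keys]
    show p ∉ List.map Prod.fst _
    rw [enumerate_pd_items players hnd (fun a => a), List.map_map]
    have : (Prod.fst ∘ fun a : Int × String => (a.2, a.1)) = fun a : Int × String => a.2 := rfl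
    rw [this, PySem.List.map_snd_enumerate]
    exact hp

lemma rank0_items (players : List String) (hnd : players.Nodup) :
    ((PySem.List.enumerate players 0).foldl (fun d ip => d.insert ip.2 ip.1)
      (PySem.Dict.empty : PySem.Dict String Int)).items =
    (PySem.List.enumerate players 0).map (fun a => (a.2, a.1)) := by
  have h := enumerate_pd_items players hnd (fun a => a)
  simpa using h

lemma rank_keys (players : List String) (hnd : players.Nodup) :
    ((PySem.List.enumerate players 0).foldl (fun d ip => d.insert ip.2 ip.1)
      (PySem.Dict.empty : PySem.Dict String Int)).keys = players := by
  show List.map Prod.fst _ = players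
  rw [rank0_items players hnd, List.map_map]
  have : (Prod.fst ∘ fun a : Int × String => (a.2, a.1)) = fun a : Int × String => a.2 := rfl
  rw [this, PySem.List.map_snd_enumerate]

-- ---------- final reconstruction (result[r] = p placement) ----------

lemma set_self (players : List String) (j : Nat) (hj : j < players.length) :
    players.set j players[j] = players := by
  apply List.ext_getElem
  · simp
  · intro i h1 h2
    rw [List.getElem_set]
    split_ifs with h
    · subst h; rfl
    · rfl

lemma getD_set (res : List String) (jp j : Nat) (v : String) (hj : j < res.length) :
    (res.set jp v).getD j "" = if j = jp then v else res.getD j "" := by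
  rw [getD_eq_getElem' _ j (by simpa using hj), List.getElem_set]
  split_ifs with h1 h2 <;> first
    | rfl
    | omega
    | rw [getD_eq_getElem' res j hj]

-- items produced by the dict comprehension always point back into players
lemma build_items_sound (players : List String) :
    ∀ (l : List (Int × String)) (d : PySem.Dict String Int),
    (∀ pr ∈ d.items, ∃ j : Nat, j < players.length ∧ pr.2 = (j : Int) ∧ players.getD j "" = pr.1) →
    (∀ x ∈ l, ∃ j : Nat, j < players.length ∧ x.1 = (j : Int) ∧ players.getD j "" = x.2) →
    ∀ pr ∈ (l.foldl (fun d ip => d.insert ip.2 ip.1) d).items,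
      ∃ j : Nat, j < players.length ∧ pr.2 = (j : Int) ∧ players.getD j "" = pr.1 := by
  intro l
  induction l with
  | nil =>
    intro d hd _ pr hpr
    exact hd pr hpr
  | cons x xs ih =>
    intro d hd hl pr hpr
    simp only [List.foldl_cons] at hpr
    refine ih (d.insert x.2 x.1) ?_ (fun y hy => hl y (List.mem_cons_of_mem _ hy)) pr hpr
    intro pr' hpr'
    rcases (PySem.Dict.mem_items_insert _ _ _ _).mp hpr' with h | ⟨h, _⟩
    · obtain ⟨j, hj, e1, e2⟩ := hl x List.mem_cons_self
      exact ⟨j, hj, by rw [h]; exact e1, by rw [h]; exact e2⟩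
    · exact hd pr' h

-- a placement pass whose every write puts players[j] back at j is the identity
lemma place_noop (players : List String) :
    ∀ (its : List (String × Int)),
    (∀ pr ∈ its, ∃ j : Nat, j < players.length ∧ pr.2 = (j : Int) ∧ players.getD j "" = pr.1) →
    its.foldl (fun res pr => PySem.List.pySetD res pr.2 pr.1) players = players := by
  intro its
  induction its with
  | nil => intro _; rfl
  | cons pr prs ih =>
    intro h
    obtain ⟨j, hj, e2, e1⟩ := h pr List.mem_cons_self
    have hstep : PySem.List.pySetD players pr.2 pr.1 = players := by
      rw [e2, ← e1, PySem.List.pySetD_natCast, getD_eq_getElem' players j hj,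
          set_self players j hj]
    simp only [List.foldl_cons, hstep]
    exact ih (fun y hy => h y (List.mem_cons_of_mem _ hy))

lemma place_length (idx : String → Int) :
    ∀ (ps : List String) (res : List String),
    (ps.foldl (fun res p => PySem.List.pySetD res (idx p) p) res).length = res.length := by
  intro ps
  induction ps with
  | nil => intro res; rfl
  | cons p ps ih =>
    intro res
    simp only [List.foldl_cons]
    rw [ih (PySem.List.pySetD res (idx p) p), PySem.List.length_pySetD]

-- the placement pass writes each runner of the final order arrF to its own slot
lemma place_fold (arrF : List String) (hndF : arrF.Nodup) (idx : String → Int)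
    (hidx : ∀ (j : Nat) (hj : j < arrF.length), idx (arrF[j]) = (j : Int)) :
    ∀ (ps : List String) (res : List String), res.length = arrF.length →
    (∀ p ∈ ps, p ∈ arrF) →
    ∀ (j : Nat) (hj : j < arrF.length),
    ((ps.foldl (fun res p => PySem.List.pySetD res (idx p) p) res).getD j "") =
      if arrF[j] ∈ ps then arrF[j] else res.getD j "" := by
  intro ps
  induction ps with
  | nil =>
    intro res hlen _ j hj
    simp
  | cons p ps ih =>
    intro res hlen hmem j hj
    obtain ⟨jp, hjp, ep⟩ := List.mem_iff_getElem.mp (hmem p List.mem_cons_self)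
    have hset : PySem.List.pySetD res (idx p) p = res.set jp p := by
      rw [show idx p = ((jp : Nat) : Int) by rw [← ep]; exact hidx jp hjp,
          PySem.List.pySetD_natCast]
    simp only [List.foldl_cons, hset]
    rw [ih (res.set jp p) (by simpa using hlen)
        (fun q hq => hmem q (List.mem_cons_of_mem _ hq)) j hj]
    by_cases hin : arrF[j] ∈ ps
    · rw [if_pos hin, if_pos (List.mem_cons_of_mem _ hin)]
    · rw [if_neg hin, getD_set res jp j p (by omega)]
      by_cases hpj : arrF[j] = p
      · have hjjp : j = jp := hndF.getElem_inj_iff.mp (hpj.trans ep.symm)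
        rw [if_pos hjjp, if_pos (by rw [hpj]; exact List.mem_cons_self), hpj]
      · have hjjp : j ≠ jp := by
          intro h
          subst h
          exact hpj ep
        rw [if_neg hjjp, if_neg (by
          intro h
          rcases List.mem_cons.mp h with h | h
          · exact hpj h
          · exact hin h)]

-- ===== VERDICT (by name: the statement is the Claim_ definition above) =====
theorem solution_spec : Claim_equal_solution := by
  intro players callings _ hpre
  show solution players callings = solution_alt players callings
  unfold solution solution_alt
  rcases hpre with rfl | ⟨hnd, hvr⟩
  · -- callings = []: A returns indexPlayer.values() = players; B's placement pass is a no-op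
    simp only [List.foldl_nil]
    have hA : ((PySem.List.enumerate players 0).foldl (fun d ip => d.insert (ip.1 + 1) ip.2)
        (PySem.Dict.empty : PySem.Dict Int String)).values = players := by
      simp only [PySem.Dict.values, enumerate_ip_items players, List.map_map]
      exact range_map_getD players
    have hB : ((PySem.List.enumerate players 0).foldl (fun d ip => d.insert ip.2 ip.1)
        (PySem.Dict.empty : PySem.Dict String Int)).items.foldl
        (fun res pr => PySem.List.pySetD res pr.2 pr.1) players = players := by
      apply place_noop
      apply build_items_sound players (PySem.List.enumerate players 0) PySem.Dict.empty
      · intro pr hpr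
        simp [PySem.Dict.empty] at hpr
      · intro x hx
        obtain ⟨k, hk, e⟩ := (PySem.List.mem_enumerate_iff _ _ _).mp hx
        refine ⟨k, hk, ?_, ?_⟩
        · rw [e]; simp
        · rw [e, getD_eq_getElem' players k hk]
    rw [hA, hB]
  · -- distinct names, valid run: both sides equal the reference run
    rw [loopA callings players _ _
      ⟨hnd, fun j hj => pd_initial players hnd j hj, enumerate_ip_items players⟩ hvr]
    obtain ⟨hndF, hmemF, hrankF, hkeysF⟩ := loopB players callings players
      ((PySem.List.enumerate players 0).foldl (fun d ip => d.insert ip.2 ip.1) PySem.Dict.empty)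
      hnd (fun x => Iff.rfl) (rank_initial players hnd) (rank_keys players hnd) hvr
    have hperm : (callings.foldl runStep players).Perm players :=
      (List.perm_ext_iff_of_nodup hndF hnd).mpr hmemF
    have hlen : players.length = (callings.foldl runStep players).length := hperm.length_eq.symm
    have hkeysnodup : (callings.foldl (solBStep players)
        ((PySem.List.enumerate players 0).foldl (fun d ip => d.insert ip.2 ip.1)
          PySem.Dict.empty)).keys.Nodup := by
      rw [hkeysF]; exact hnd
    have hitems : (callings.foldl (solBStep players)
        ((PySem.List.enumerate players 0).foldl (fun d ip => d.insert ip.2 ip.1)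
          PySem.Dict.empty)).items =
        players.map (fun p => (p, (callings.foldl (solBStep players)
          ((PySem.List.enumerate players 0).foldl (fun d ip => d.insert ip.2 ip.1)
            PySem.Dict.empty)).getD p 0)) := by
      rw [PySem.Dict.items_eq_map_keys _ hkeysnodup 0, hkeysF]
    have hidx : ∀ (j : Nat) (hj : j < (callings.foldl runStep players).length),
        (callings.foldl (solBStep players)
          ((PySem.List.enumerate players 0).foldl (fun d ip => d.insert ip.2 ip.1)
            PySem.Dict.empty)).getD ((callings.foldl runStep players)[j]'hj) 0 = (j : Int) := by
      intro j hj
      rw [PySem.Dict.getD_eq_get?_getD, hrankF,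
        index?_of_nodup (callings.foldl runStep players) hndF j hj]
      rfl
    show callings.foldl runStep players =
      ((callings.foldl (solBStep players)
          ((PySem.List.enumerate players 0).foldl (fun d ip => d.insert ip.2 ip.1)
            PySem.Dict.empty)).items.foldl
        (fun res pr => PySem.List.pySetD res pr.2 pr.1) players)
    rw [hitems, List.foldl_map]
    symm
    apply List.ext_getElem
    · rw [place_length]
      omega
    · intro i h1 h2
      have hi2 : i < (callings.foldl runStep players).length := h2
      rw [← getD_eq_getElem' _ i h1,
        place_fold (callings.foldl runStep players) hndF _ hidx players players hlen
          (fun p hp => (hmemF p).mpr hp) i hi2,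
        if_pos ((hmemF _).mp (List.getElem_mem hi2))]
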